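-- pv_equiv track=rewrite | github.com/swativ5/notes | computer vision/bayer.py | get_rgb_mat
-- ===== SOURCE A (Python) =====
-- def get_rgb_mat(mat, pattern='GRGB'):
--     row_pattern11 = pattern[0] # G
--     row_pattern12 = pattern[1] # R
--     row_pattern21 = pattern[2] # G
--     row_pattern22 = pattern[3] # B
--     R = [[0 for _ in range(len(mat[0]))] for _ in range(len(mat))]
--     G = [[0 for _ in range(len(mat[0]))] for _ in range(len(mat))]
--     B = [[0 for _ in range(len(mat[0]))] for _ in range(len(mat))]
--     col_map = {'R': R, 'G': G, 'B': B}
--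
--     for i in range(len(mat)):
--           for j in range(len(mat[0])):
--               if i % 2 == 0:
--                      if j % 2 == 0:
--                             col_map[row_pattern11][i][j] = mat[i][j]
--                      else:
--                             col_map[row_pattern12][i][j] = mat[i][j]
--               else:
--                      if j % 2 == 0:
--                             col_map[row_pattern22][i][j] = mat[i][j]
--                      else:
--                             col_map[row_pattern21][i][j] = mat[i][j]
--     return [R, G, B]
-- ===== SOURCE B (Python) =====
-- def get_rgb_mat(mat, pattern='GRGB'):
--     look = {(0, 0): pattern[0], (0, 1): pattern[1],
--             (1, 0): pattern[3], (1, 1): pattern[2]}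
--     h, w = len(mat), len(mat[0])
--
--     def channel(c):
--         return [[mat[i][j] if look[(i % 2, j % 2)] == c else 0
--                  for j in range(w)] for i in range(h)]
--
--     return [channel('R'), channel('G'), channel('B')]
-- ===== Notes on version B (the rewrite author's own statement) =====
-- stated objective: simpler
-- what changed: Replaces the single dispatching pass that mutates three pre-zeroed matrices through a dict of aliases with a 2x2 position->channel lookup and three independent masking comprehensions (channel[i][j] = mat[i][j] if the position's letter matches, else 0).
-- outside the precondition, e.g. on get_rgb_mat([], 'GRGB'): A returns [[], [], []], B raises IndexError
import Mathlib
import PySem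

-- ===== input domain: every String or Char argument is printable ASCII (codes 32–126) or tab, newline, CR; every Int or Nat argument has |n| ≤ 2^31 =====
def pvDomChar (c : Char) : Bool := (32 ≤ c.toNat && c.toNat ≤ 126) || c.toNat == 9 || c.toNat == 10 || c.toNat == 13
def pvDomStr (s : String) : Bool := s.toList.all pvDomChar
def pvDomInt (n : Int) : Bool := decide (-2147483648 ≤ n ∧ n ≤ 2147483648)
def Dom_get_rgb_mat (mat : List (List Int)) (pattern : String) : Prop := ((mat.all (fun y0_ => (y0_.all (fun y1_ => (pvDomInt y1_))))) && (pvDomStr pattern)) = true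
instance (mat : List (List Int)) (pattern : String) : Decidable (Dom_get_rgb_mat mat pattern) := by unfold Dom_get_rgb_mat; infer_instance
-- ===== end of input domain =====

-- B replaces A's single dispatching pass (mutating three pre-zeroed matrices through a
-- dict of channel aliases) with a 2x2 position->letter lookup and three independent
-- masking passes, one per channel; objective: simpler.


-- ===== PORT A =====
-- col_map[ch][i][j] = v : update the matrix named by ch (one of the three), leave the others
def pvUpd (ch target : Char) (m : List (List Int)) (i j : Nat) (v : Int) : List (List Int) :=
  if ch = target then m.modify i (fun row => row.set j v) else m

def get_rgb_mat (mat : List (List Int)) (pattern : String) : List (List (List Int)) :=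
  let p := pattern.toList
  let rp11 := p.getD 0 ' '   -- pattern[0]; Pre_ guarantees 4 ≤ len(pattern)
  let rp12 := p.getD 1 ' '
  let rp21 := p.getD 2 ' '
  let rp22 := p.getD 3 ' '
  let rows := mat.length
  let cols := (mat.headD []).length   -- len(mat[0]); Pre_ guarantees mat ≠ []
  let z : List (List Int) := List.replicate rows (List.replicate cols 0)
  let st := (List.range rows).foldl (fun st i =>
    (List.range cols).foldl (fun st j =>
      let ch := if i % 2 = 0 then (if j % 2 = 0 then rp11 else rp12)
                else (if j % 2 = 0 then rp22 else rp21)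
      let v := (mat.getD i []).getD j 0   -- mat[i][j]; Pre_ guarantees the indices in range
      (pvUpd ch 'R' st.1 i j v, pvUpd ch 'G' st.2.1 i j v, pvUpd ch 'B' st.2.2 i j v))
      st) (z, z, z)
  [st.1, st.2.1, st.2.2]

-- ===== PORT B =====
def get_rgb_mat_alt (mat : List (List Int)) (pattern : String) : List (List (List Int)) :=
  let p := pattern.toList
  let look : PySem.Dict (Nat × Nat) Char := PySem.Dict.ofList
    [((0, 0), p.getD 0 ' '), ((0, 1), p.getD 1 ' '),
     ((1, 0), p.getD 3 ' '), ((1, 1), p.getD 2 ' ')]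
  let h := mat.length
  let w := (mat.headD []).length
  let channel := fun (c : Char) =>
    (List.range h).map (fun i => (List.range w).map (fun j =>
      if look.getD (i % 2, j % 2) ' ' = c then (mat.getD i []).getD j 0 else 0))
  [channel 'R', channel 'G', channel 'B']

-- ===== PRECONDITION & SPEC =====
-- a pattern letter is usable as a col_map key only if it is one of R/G/B
def pvOkChar (c : Char) : Bool := c = 'R' || c = 'G' || c = 'B'

-- Pre_ excludes exactly the inputs where Python A raises — a pattern shorter than 4
-- (IndexError), a visited Bayer position whose pattern letter is not R/G/B (KeyError in
-- col_map), a ragged row shorter than row 0 (IndexError on mat[i][j]) — plus the empty mat,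
-- where A happens to return [[], [], []] without ever evaluating mat[0] while B's natural
-- len(mat[0]) raises IndexError there.
def Pre_get_rgb_mat (mat : List (List Int)) (pattern : String) : Prop :=
  let p := pattern.toList
  let cols := (mat.headD []).length
  4 ≤ p.length ∧ mat ≠ [] ∧
  (mat.all (fun row => cols ≤ row.length)) = true ∧
  (1 ≤ cols → pvOkChar (p.getD 0 ' ') = true) ∧
  (2 ≤ cols → pvOkChar (p.getD 1 ' ') = true) ∧
  (2 ≤ mat.length ∧ 1 ≤ cols → pvOkChar (p.getD 3 ' ') = true) ∧
  (2 ≤ mat.length ∧ 2 ≤ cols → pvOkChar (p.getD 2 ' ') = true)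
instance (mat : List (List Int)) (pattern : String) : Decidable (Pre_get_rgb_mat mat pattern) := by
  unfold Pre_get_rgb_mat; infer_instance

def pvWitness_get_rgb_mat : List (List Int) × String := ([[1, 2], [3, 4]], "GRGB")

def Spec_get_rgb_mat (mat : List (List Int)) (pattern : String) (out : List (List (List Int))) : Prop := out = get_rgb_mat_alt mat pattern
instance (mat : List (List Int)) (pattern : String) (out : List (List (List Int))) : Decidable (Spec_get_rgb_mat mat pattern out) := by unfold Spec_get_rgb_mat; infer_instance

-- ===== CLAIM (what is proved, stated in full; the proofs are below) =====
def Claim_equal_get_rgb_mat : Prop := ∀ (mat : List (List Int)) (pattern : String), Dom_get_rgb_mat mat pattern → Pre_get_rgb_mat mat pattern → Spec_get_rgb_mat mat pattern (get_rgb_mat mat pattern)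

-- ===== LEMMAS AND PROOFS =====

-- modify at the seam of an append
theorem pvModify_append {α : Type} (l1 l2 : List α) (x : α) (f : α → α) :
    (l1 ++ x :: l2).modify l1.length f = l1 ++ f x :: l2 := by
  apply List.ext_getElem?
  intro j
  rw [List.getElem?_modify]
  rcases lt_trichotomy j l1.length with h | h | h
  · simp [List.getElem?_append_left h, h.ne']
  · subst h; simp
  · rw [List.getElem?_append_right (by omega), List.getElem?_append_right (by omega)]
    rcases Nat.exists_eq_add_of_lt h with ⟨k, rfl⟩
    simp [show l1.length + k + 1 - l1.length = k + 1 by omega,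
          show ¬ l1.length = l1.length + k + 1 by omega]

theorem pvModify_append' {α : Type} (n : Nat) (l1 l2 : List α) (x : α) (f : α → α)
    (h : n = l1.length) : (l1 ++ x :: l2).modify n f = l1 ++ f x :: l2 := by
  subst h; exact pvModify_append l1 l2 x f

theorem pvModify_modify {α : Type} (m : List α) (i : Nat) (f g : α → α) :
    (m.modify i f).modify i g = m.modify i (fun x => g (f x)) := by
  apply List.ext_getElem?
  intro j
  rw [List.getElem?_modify, List.getElem?_modify, List.getElem?_modify]
  by_cases h : i = j
  · simp [h]; cases m[j]? <;> simp
  · simp [h]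

-- componentwise fold over a triple splits into three folds
theorem pvFoldl3 {α β γ δ : Type} (f : α → δ → α) (g : β → δ → β) (h : γ → δ → γ)
    (l : List δ) (a : α) (b : β) (c : γ) :
    l.foldl (fun st x => (f st.1 x, g st.2.1 x, h st.2.2 x)) (a, b, c) =
      (l.foldl f a, l.foldl g b, l.foldl h c) := by
  induction l generalizing a b c with
  | nil => rfl
  | cons x t ih => exact ih (f a x) (g b x) (h c x)

-- conditional modify-at-i folds hit only row i
theorem pvInner_modify (pick : Nat → Char) (val : Nat → Int) (X : Char) (i : Nat)
    (l : List Nat) (m : List (List Int)) :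
    l.foldl (fun m j => if pick j = X then m.modify i (fun r => r.set j (val j)) else m) m =
      m.modify i (fun r => l.foldl (fun r j => if pick j = X then r.set j (val j) else r) r) := by
  induction l generalizing m with
  | nil => exact (List.modify_id i m).symm
  | cons j t ih =>
      simp only [List.foldl_cons]
      by_cases h : pick j = X
      · simp [h, ih, pvModify_modify]
      · simp [h, ih]

-- the row-level fold over range k on the zero row is the masked prefix
theorem pvRow_fold (pick : Nat → Char) (val : Nat → Int) (X : Char) (cols : Nat) :
    ∀ k, k ≤ cols →
      (List.range k).foldl (fun r j => if pick j = X then r.set j (val j) else r)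
          (List.replicate cols (0 : Int)) =
        (List.range k).map (fun j => if pick j = X then val j else 0) ++
          List.replicate (cols - k) (0 : Int) := by
  intro k
  induction k with
  | zero => simp
  | succ k ih =>
      intro hk
      rw [List.range_succ, List.foldl_append, ih (by omega), List.map_append]
      have hrep : List.replicate (cols - k) (0 : Int) = 0 :: List.replicate (cols - (k + 1)) 0 := by
        have : cols - k = (cols - (k + 1)) + 1 := by omega
        rw [this, List.replicate_succ]
      simp only [List.foldl_cons, List.foldl_nil, List.map_cons, List.map_nil]
      by_cases h : pick k = X
      · rw [if_pos h, hrep, List.set_append,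
            if_neg (by simp)]
        simp [h]
      · rw [if_neg h, hrep]
        simp [h]

-- the matrix-level fold over range k on the zero matrix is the masked prefix of rows
theorem pvOuter_fold (pick : Nat → Nat → Char) (val : Nat → Nat → Int) (X : Char)
    (rows cols : Nat) :
    ∀ k, k ≤ rows →
      (List.range k).foldl (fun m i =>
          (List.range cols).foldl
            (fun m j => if pick i j = X then m.modify i (fun r => r.set j (val i j)) else m) m)
          (List.replicate rows (List.replicate cols (0 : Int))) =
        (List.range k).map (fun i =>
            (List.range cols).map (fun j => if pick i j = X then val i j else 0)) ++
          List.replicate (rows - k) (List.replicate cols (0 : Int)) := by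
  intro k
  induction k with
  | zero => simp
  | succ k ih =>
      intro hk
      rw [List.range_succ, List.foldl_append, ih (by omega), List.map_append]
      simp only [List.foldl_cons, List.foldl_nil, List.map_cons, List.map_nil]
      rw [pvInner_modify]
      have hrep : List.replicate (rows - k) (List.replicate cols (0 : Int)) =
          List.replicate cols (0 : Int) :: List.replicate (rows - (k + 1)) (List.replicate cols 0) := by
        have : rows - k = (rows - (k + 1)) + 1 := by omega
        rw [this, List.replicate_succ]
      rw [hrep]
      have hlen : k = ((List.range k).map (fun i =>
          (List.range cols).map (fun j => if pick i j = X then val i j else 0))).length := by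
        simp
      rw [pvModify_append' _ _ _ _ _ hlen]
      simp [pvRow_fold (pick k) (val k) X cols cols le_rfl]

-- the dict lookup in B computes the same letter as A's branch tree
theorem pvLook_eval (p0 p1 p2 p3 : Char) (i j : Nat) :
    (PySem.Dict.ofList [((0, 0), p0), ((0, 1), p1), ((1, 0), p3), ((1, 1), p2)] :
        PySem.Dict (Nat × Nat) Char).getD (i % 2, j % 2) ' ' =
      (if i % 2 = 0 then (if j % 2 = 0 then p0 else p1)
       else (if j % 2 = 0 then p3 else p2)) := by
  rcases Nat.mod_two_eq_zero_or_one i with hi | hi <;>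
    rcases Nat.mod_two_eq_zero_or_one j with hj | hj <;>
      simp [hi, hj] <;> rfl

-- the nested componentwise fold over the triple splits into three nested folds
theorem pvSplit (F G H : List (List Int) → Nat → Nat → List (List Int))
    (lr lc : List Nat) (a b c : List (List Int)) :
    lr.foldl (fun st i => lc.foldl (fun st j => (F st.1 i j, G st.2.1 i j, H st.2.2 i j)) st) (a, b, c)
      = (lr.foldl (fun m i => lc.foldl (fun m j => F m i j) m) a,
         lr.foldl (fun m i => lc.foldl (fun m j => G m i j) m) b,
         lr.foldl (fun m i => lc.foldl (fun m j => H m i j) m) c) := by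
  induction lr generalizing a b c with
  | nil => rfl
  | cons i t ih =>
      simp only [List.foldl_cons]
      rw [pvFoldl3 (fun m j => F m i j) (fun m j => G m i j) (fun m j => H m i j)]
      exact ih _ _ _

theorem pvMain (mat : List (List Int)) (pattern : String) :
    get_rgb_mat mat pattern = get_rgb_mat_alt mat pattern := by
  unfold get_rgb_mat get_rgb_mat_alt
  simp only [pvUpd, pvLook_eval]
  rw [pvSplit (fun m i j => if (if i % 2 = 0 then if j % 2 = 0 then pattern.toList.getD 0 ' ' else pattern.toList.getD 1 ' ' else if j % 2 = 0 then pattern.toList.getD 3 ' ' else pattern.toList.getD 2 ' ') = 'R' then m.modify i fun row => row.set j ((mat.getD i []).getD j 0) else m)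
      (fun m i j => if (if i % 2 = 0 then if j % 2 = 0 then pattern.toList.getD 0 ' ' else pattern.toList.getD 1 ' ' else if j % 2 = 0 then pattern.toList.getD 3 ' ' else pattern.toList.getD 2 ' ') = 'G' then m.modify i fun row => row.set j ((mat.getD i []).getD j 0) else m)
      (fun m i j => if (if i % 2 = 0 then if j % 2 = 0 then pattern.toList.getD 0 ' ' else pattern.toList.getD 1 ' ' else if j % 2 = 0 then pattern.toList.getD 3 ' ' else pattern.toList.getD 2 ' ') = 'B' then m.modify i fun row => row.set j ((mat.getD i []).getD j 0) else m)]
  rw [pvOuter_fold _ _ 'R' mat.length (mat.headD []).length mat.length le_rfl,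
      pvOuter_fold _ _ 'G' mat.length (mat.headD []).length mat.length le_rfl,
      pvOuter_fold _ _ 'B' mat.length (mat.headD []).length mat.length le_rfl]
  simp

-- ===== VERDICT (by name: the statement is the Claim_ definition above) =====
theorem get_rgb_mat_spec : Claim_equal_get_rgb_mat := by
  intro mat pattern _ _
  unfold Spec_get_rgb_mat
  exact pvMain mat pattern
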